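-- pv_equiv track=rewrite | github.com/IKANISA1/DINEINMT | dinein_app/scripts/stamp_pwa_bundle.py | sort_resources
-- ===== SOURCE A (Python) =====
-- PRIORITY_ASSETS = [
--     "/index.html",
--     "/offline.html",
--     "/manifest.json",
--     "/flutter.js",
--     "/flutter_bootstrap.js",
--     "/main.dart.js",
-- ]
--
-- def sort_resources(resources: list[str]) -> list[str]:
--     ordered: list[str] = []
--     seen: set[str] = set()
--     for asset in PRIORITY_ASSETS:
--         if asset in resources and asset not in seen:
--             ordered.append(asset)
--             seen.add(asset)
--     for asset in resources:
--         if asset not in seen: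
--             ordered.append(asset)
--             seen.add(asset)
--     return ordered
-- ===== SOURCE B (Python) =====
-- PRIORITY_ASSETS = [
--     "/index.html",
--     "/offline.html",
--     "/manifest.json",
--     "/flutter.js",
--     "/flutter_bootstrap.js",
--     "/main.dart.js",
-- ]
--
-- def sort_resources(resources: list[str]) -> list[str]:
--     deduped = list(dict.fromkeys(resources))
--     n = len(PRIORITY_ASSETS)
--     return sorted(deduped, key=lambda a: PRIORITY_ASSETS.index(a) if a in PRIORITY_ASSETS else n)
-- ===== Notes on version B (the rewrite author's own statement) =====
-- stated objective: idiomatic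
-- what changed: Replaces the two explicit seen-set accumulation loops by an ordered dedup (dict.fromkeys) followed by one stable sort keyed on the asset's PRIORITY_ASSETS index (non-priority assets share the sentinel key, so stability keeps their original order).
import Mathlib
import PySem

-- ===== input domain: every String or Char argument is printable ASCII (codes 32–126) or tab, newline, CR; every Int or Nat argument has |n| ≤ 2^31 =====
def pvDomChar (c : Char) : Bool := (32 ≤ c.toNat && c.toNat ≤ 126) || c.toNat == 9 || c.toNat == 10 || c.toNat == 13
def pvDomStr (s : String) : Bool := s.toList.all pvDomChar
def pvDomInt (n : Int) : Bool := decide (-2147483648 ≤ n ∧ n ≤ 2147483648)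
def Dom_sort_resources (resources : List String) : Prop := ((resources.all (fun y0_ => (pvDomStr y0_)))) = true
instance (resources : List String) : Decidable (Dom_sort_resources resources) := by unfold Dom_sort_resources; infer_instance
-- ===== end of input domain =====

-- B replaces A's two seen-set accumulation loops by ordered dedup + one stable sort
-- keyed on the PRIORITY_ASSETS index (idiomatic; same return value, proved below).


-- ===== PORT A =====
def PRIORITY_ASSETS : List String :=
  ["/index.html", "/offline.html", "/manifest.json", "/flutter.js",
   "/flutter_bootstrap.js", "/main.dart.js"]

-- literal port of A: first loop over PRIORITY_ASSETS, then loop over resources,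
-- both appending to `ordered` and adding to the set `seen`
def sort_resources (resources : List String) : List String :=
  let st1 := PRIORITY_ASSETS.foldl
    (fun st asset =>
      if asset ∈ resources ∧ ¬ asset ∈ st.2
      then (st.1 ++ [asset], PySem.Set.add st.2 asset) else st)
    (([] : List String), (PySem.Set.empty : PySem.Set String))
  let st2 := resources.foldl
    (fun st asset =>
      if ¬ asset ∈ st.2
      then (st.1 ++ [asset], PySem.Set.add st.2 asset) else st)
    st1
  st2.1

-- ===== PORT B =====
-- the sort key: PRIORITY_ASSETS.index(a) if a in PRIORITY_ASSETS else len(PRIORITY_ASSETS)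
-- (.index is guarded by the membership test, so `.getD 0` never fires on none — exact)
def pyKey (a : String) : Int :=
  if a ∈ PRIORITY_ASSETS then (((PySem.List.index? PRIORITY_ASSETS a).getD 0 : Nat) : Int)
  else (PRIORITY_ASSETS.length : Int)

def sort_resources_alt (resources : List String) : List String :=
  let deduped := PySem.List.dedup resources
  PySem.List.sorted deduped pyKey false

-- ===== PRECONDITION & SPEC =====
def Spec_sort_resources (resources : List String) (out : List String) : Prop := out = sort_resources_alt resources
instance (resources : List String) (out : List String) : Decidable (Spec_sort_resources resources out) := by unfold Spec_sort_resources; infer_instance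

-- ===== CLAIM (what is proved, stated in full; the proofs are below) =====
def Claim_equal_sort_resources : Prop := ∀ (resources : List String), Dom_sort_resources resources → Spec_sort_resources resources (sort_resources resources)

-- ===== LEMMAS AND PROOFS =====

-- key facts ------------------------------------------------------------
lemma key_lt_of_mem (a : String) (h : a ∈ PRIORITY_ASSETS) : pyKey a < 6 := by
  fin_cases h <;> decide

lemma key_of_not_mem (a : String) (h : a ∉ PRIORITY_ASSETS) : pyKey a = 6 := by
  simp [pyKey, h]; rfl

lemma key_le (a : String) : pyKey a ≤ 6 := by
  by_cases h : a ∈ PRIORITY_ASSETS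
  · exact le_of_lt (key_lt_of_mem a h)
  · exact le_of_eq (key_of_not_mem a h)

lemma key_pairwise : (PRIORITY_ASSETS.map pyKey).Pairwise (· < ·) := by decide

-- canonical form shared by both sides ----------------------------------
def canonOf (v : List String) : List String :=
  PRIORITY_ASSETS.filter (fun a => decide (a ∈ v)) ++ v.filter (fun a => decide (a ∉ PRIORITY_ASSETS))

-- first-occurrence subsequence of l relative to already-seen o
def fOcc : List String → List String → List String
  | [], _ => []
  | a :: l, o => if a ∈ o then fOcc l o else a :: fOcc l (o ++ [a])

-- insertBy machinery (B side) ------------------------------------------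
lemma insertBy_head (bef : String → String → Bool) (x : String) (ys : List String)
    (h : ∀ y ∈ ys, bef x y = true) :
    PySem.List.insertBy bef x ys = x :: ys := by
  cases ys with
  | nil => rfl
  | cons y ys => simp [PySem.List.insertBy, h y List.mem_cons_self]

lemma insert_canon_mem (x : String) (L : List String) (v N : List String)
    (hL : (L.map pyKey).Pairwise (· < ·))
    (hx : x ∈ L) (hxv : x ∉ v)
    (hN : ∀ y ∈ N, pyKey x < pyKey y) :
    PySem.List.insertBy (fun a b => decide (pyKey a < pyKey b)) x
        (L.filter (fun a => decide (a ∈ v)) ++ N)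
      = L.filter (fun a => decide (a ∈ v ++ [x])) ++ N := by
  induction L with
  | nil => cases hx
  | cons a L ih =>
    have hL2 : (pyKey a :: L.map pyKey).Pairwise (· < ·) := by simpa using hL
    have hpw : ∀ y ∈ L, pyKey a < pyKey y := by
      intro y hy; exact (List.pairwise_cons.mp hL2).1 _ (List.mem_map_of_mem hy)
    have hL' : (L.map pyKey).Pairwise (· < ·) := (List.pairwise_cons.mp hL2).2
    have hane : ∀ y ∈ L, y ≠ a := fun y hy h => absurd (h ▸ hpw y hy) (lt_irrefl _)
    by_cases hxa : x = a
    · subst hxa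
      have hLfilt : L.filter (fun b => decide (b ∈ v ++ [x])) = L.filter (fun b => decide (b ∈ v)) := by
        refine List.filter_congr fun b hb => ?_
        have hbx : b ≠ x := hane b hb
        simp [hbx]
      rw [List.filter_cons, List.filter_cons, if_neg (by simpa using hxv),
          if_pos (by simp), hLfilt]
      apply insertBy_head
      intro y hy
      rcases List.mem_append.mp hy with h1 | h2
      · simpa using hpw y (List.mem_of_mem_filter h1)
      · simpa using hN y h2
    · have hxL : x ∈ L := by
        rcases List.mem_cons.mp hx with h | h
        · exact absurd h hxa
        · exact h
      by_cases hav : a ∈ v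
      · have hfalse : decide (pyKey x < pyKey a) = false := by
          simp [not_lt.mpr (le_of_lt (hpw x hxL))]
        rw [List.filter_cons, List.filter_cons, if_pos (by simpa using hav),
            if_pos (by simp [hav]), List.cons_append, List.cons_append]
        have hins : PySem.List.insertBy (fun a b => decide (pyKey a < pyKey b)) x
            (a :: (L.filter (fun b => decide (b ∈ v)) ++ N))
            = a :: PySem.List.insertBy (fun a b => decide (pyKey a < pyKey b)) x
                (L.filter (fun b => decide (b ∈ v)) ++ N) := by
          simp [PySem.List.insertBy, hfalse]
        rw [hins, ih hL' hxL]
      · have hav' : a ∉ v ++ [x] := by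
          simp only [List.mem_append, List.mem_singleton]
          rintro (h | h)
          · exact hav h
          · exact hxa h.symm
        rw [List.filter_cons, List.filter_cons, if_neg (by simpa using hav),
            if_neg (by simpa using hav')]
        exact ih hL' hxL

lemma insStep_canon (x : String) (v : List String) (hxv : x ∉ v) :
    PySem.List.insertBy (fun a b => decide (pyKey a < pyKey b)) x (canonOf v)
      = canonOf (v ++ [x]) := by
  by_cases hp : x ∈ PRIORITY_ASSETS
  · have hN : ∀ y ∈ v.filter (fun a => decide (a ∉ PRIORITY_ASSETS)), pyKey x < pyKey y := by
      intro y hy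
      have hyP : y ∉ PRIORITY_ASSETS := by simpa using List.of_mem_filter hy
      rw [key_of_not_mem y hyP]; exact key_lt_of_mem x hp
    have h := insert_canon_mem x PRIORITY_ASSETS v _ key_pairwise hp hxv hN
    unfold canonOf
    rw [h]
    have : (v ++ [x]).filter (fun a => decide (a ∉ PRIORITY_ASSETS))
        = v.filter (fun a => decide (a ∉ PRIORITY_ASSETS)) := by
      simp [List.filter_append, hp]
    rw [this]
  · have hall : ∀ y ∈ canonOf v, (fun a b => decide (pyKey a < pyKey b)) x y = false := by
      intro y _
      have hk := key_le y
      show decide (pyKey x < pyKey y) = false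
      rw [key_of_not_mem x hp]
      simp; omega
    rw [PySem.List.insertBy_of_forall_not_before _ _ _ hall]
    unfold canonOf
    have h1 : PRIORITY_ASSETS.filter (fun a => decide (a ∈ v ++ [x]))
        = PRIORITY_ASSETS.filter (fun a => decide (a ∈ v)) := by
      apply List.filter_congr
      intro b hb
      have : b ≠ x := fun h => hp (h ▸ hb)
      simp [this]
    have h2 : (v ++ [x]).filter (fun a => decide (a ∉ PRIORITY_ASSETS))
        = v.filter (fun a => decide (a ∉ PRIORITY_ASSETS)) ++ [x] := by
      simp [List.filter_append, hp]
    rw [h1, h2, List.append_assoc]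

lemma foldl_insert_canon (l : List String) : ∀ (v : List String), (v ++ l).Nodup →
    l.foldl (fun acc x => PySem.List.insertBy (fun a b => decide (pyKey a < pyKey b)) x acc)
      (canonOf v) = canonOf (v ++ l) := by
  induction l with
  | nil => intro v _; simp
  | cons a l ih =>
    intro v hnd
    rw [List.append_cons] at hnd
    have hxv : a ∉ v := by
      have h1 : (v ++ [a]).Nodup := hnd.of_append_left
      rw [List.nodup_append] at h1
      intro hv
      exact h1.2.2 a hv a (by simp) rfl
    simp only [List.foldl_cons]
    rw [insStep_canon a v hxv, ih (v ++ [a]) hnd, List.append_assoc]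
    rfl

-- fOcc machinery (A side) ----------------------------------------------
lemma fOcc_congr (l : List String) : ∀ v w, (∀ a, a ∈ v ↔ a ∈ w) → fOcc l v = fOcc l w := by
  induction l with
  | nil => intro v w _; rfl
  | cons a l ih =>
    intro v w h
    by_cases hav : a ∈ v
    · simp [fOcc, hav, (h a).mp hav, ih v w h]
    · have haw : a ∉ w := fun hw => hav ((h a).mpr hw)
      have h' : ∀ b, b ∈ v ++ [a] ↔ b ∈ w ++ [a] := by
        intro b; simp [h b]
      simp [fOcc, hav, haw, ih _ _ h']

lemma fOcc_filter (l : List String) : ∀ u o, fOcc l (u ++ o) = (fOcc l u).filter (fun a => decide (a ∉ o)) := by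
  induction l with
  | nil => intro u o; rfl
  | cons a l ih =>
    intro u o
    by_cases hau : a ∈ u
    · simp [fOcc, hau, List.mem_append.mpr (Or.inl hau), ih u o]
    · by_cases hao : a ∈ o
      · have : a ∈ u ++ o := List.mem_append.mpr (Or.inr hao)
        have hcongr : fOcc l (u ++ o) = fOcc l (u ++ [a] ++ o) := by
          apply fOcc_congr
          intro b
          simp only [List.mem_append, List.mem_singleton]
          constructor
          · rintro (h | h)
            · exact Or.inl (Or.inl h)
            · exact Or.inr h
          · rintro ((h | rfl) | h)
            · exact Or.inl h
            · exact Or.inr hao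
            · exact Or.inr h
        simp only [fOcc, if_pos this, if_neg hau]
        rw [hcongr, ih (u ++ [a]) o]
        simp [hao]
      · have : a ∉ u ++ o := by simp [hau, hao]
        simp only [fOcc, if_neg this, if_neg hau]
        have : fOcc l (u ++ o ++ [a]) = fOcc l (u ++ [a] ++ o) := by
          apply fOcc_congr; intro b
          simp only [List.mem_append, List.mem_singleton]
          tauto
        rw [this, ih (u ++ [a]) o]
        simp [hao]

lemma foldl_add_eq_fOcc (l : List String) : ∀ (s : PySem.Set String),
    l.foldl PySem.Set.add s = s ++ fOcc l s := by
  induction l with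
  | nil =>
    intro s
    show s = s ++ fOcc [] s
    simp [fOcc]
  | cons a l ih =>
    intro s
    by_cases has : a ∈ s
    · have : PySem.Set.add s a = s := by
        simp [PySem.Set.add, List.contains_eq_mem, has]
      simp only [List.foldl_cons, this, ih s, fOcc, if_pos has]
    · have : PySem.Set.add s a = s ++ [a] := by
        simp [PySem.Set.add, List.contains_eq_mem, has]
      simp only [List.foldl_cons, this, ih (s ++ [a]), fOcc, if_neg has]
      simp

lemma dedup_eq_fOcc (l : List String) : PySem.List.dedup l = fOcc l [] := by
  rw [PySem.List.dedup_eq_ofList]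
  show l.foldl PySem.Set.add PySem.Set.empty = fOcc l []
  rw [foldl_add_eq_fOcc]
  rfl

-- A's second loop
lemma loopA2 (l : List String) : ∀ (o : List String) (s : PySem.Set String),
    (∀ a, a ∈ s ↔ a ∈ o) →
    (l.foldl (fun st asset => if ¬ asset ∈ st.2
        then (st.1 ++ [asset], PySem.Set.add st.2 asset) else st) (o, s)).1
      = o ++ fOcc l o := by
  induction l with
  | nil =>
    intro o s _
    show o = o ++ fOcc [] o
    simp [fOcc]
  | cons a l ih =>
    intro o s hs
    by_cases hao : a ∈ o
    · have h1 : ¬ (¬ a ∈ s) := not_not_intro ((hs a).mpr hao)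
      rw [List.foldl_cons, if_neg h1, ih o s hs]
      simp only [fOcc, if_pos hao]
    · have h1 : ¬ a ∈ s := fun h => hao ((hs a).mp h)
      have hs' : ∀ b, b ∈ PySem.Set.add s a ↔ b ∈ o ++ [a] := by
        intro b; rw [PySem.Set.mem_add]; simp [hs b]
      rw [List.foldl_cons, if_pos h1, ih (o ++ [a]) _ hs']
      simp only [fOcc, if_neg hao]
      simp

-- A's first loop
lemma loopA1 (xs : List String) (L : List String) : ∀ (o : List String) (s : PySem.Set String),
    L.Nodup → (∀ a, a ∈ s ↔ a ∈ o) → (∀ a ∈ L, a ∉ o) →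
    (L.foldl (fun st asset => if asset ∈ xs ∧ ¬ asset ∈ st.2
        then (st.1 ++ [asset], PySem.Set.add st.2 asset) else st) (o, s)).1
        = o ++ L.filter (fun a => decide (a ∈ xs))
    ∧ (∀ a, a ∈ (L.foldl (fun st asset => if asset ∈ xs ∧ ¬ asset ∈ st.2
        then (st.1 ++ [asset], PySem.Set.add st.2 asset) else st) (o, s)).2
        ↔ a ∈ o ++ L.filter (fun a => decide (a ∈ xs))) := by
  induction L with
  | nil =>
    intro o s _ hs _
    constructor
    · show o = o ++ List.filter _ []
      simp
    · intro a
      show a ∈ s ↔ _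
      rw [hs a]
      simp
  | cons a L ih =>
    intro o s hnd hs ho
    have hao : a ∉ o := ho a List.mem_cons_self
    have has : ¬ a ∈ s := fun h => hao ((hs a).mp h)
    have hndL : L.Nodup := (List.nodup_cons.mp hnd).2
    have haL : a ∉ L := (List.nodup_cons.mp hnd).1
    by_cases hax : a ∈ xs
    · have hcond : a ∈ xs ∧ ¬ a ∈ s := ⟨hax, has⟩
      have hs' : ∀ b, b ∈ PySem.Set.add s a ↔ b ∈ o ++ [a] := by
        intro b; rw [PySem.Set.mem_add]; simp [hs b]
      have ho' : ∀ b ∈ L, b ∉ o ++ [a] := by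
        intro b hb
        simp only [List.mem_append, List.mem_singleton]
        rintro (h | h)
        · exact ho b (List.mem_cons_of_mem a hb) h
        · exact haL (h ▸ hb)
      rw [List.foldl_cons, if_pos hcond]
      have hmain := ih (o ++ [a]) (PySem.Set.add s a) hndL hs' ho'
      constructor
      · rw [hmain.1]
        simp [hax]
      · intro b
        rw [hmain.2 b]
        simp [hax]
    · have hcond : ¬ (a ∈ xs ∧ ¬ a ∈ s) := fun h => hax h.1
      rw [List.foldl_cons, if_neg hcond]
      have hmain := ih o s hndL hs (fun b hb => ho b (List.mem_cons_of_mem a hb))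
      constructor
      · rw [hmain.1]
        simp [hax]
      · intro b
        rw [hmain.2 b]
        simp [hax]

-- the two characterizations --------------------------------------------
lemma A_eq (xs : List String) :
    sort_resources xs = PRIORITY_ASSETS.filter (fun a => decide (a ∈ xs))
      ++ (PySem.List.dedup xs).filter (fun a => decide (a ∉ PRIORITY_ASSETS)) := by
  have h1 := loopA1 xs PRIORITY_ASSETS [] PySem.Set.empty (by decide)
      (by intro a; constructor <;> intro h <;> simp_all [PySem.Set.empty])
      (by intro a _ h; simp at h)
  have hfold : sort_resources xs
      = (xs.foldl (fun st asset => if ¬ asset ∈ st.2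
            then (st.1 ++ [asset], PySem.Set.add st.2 asset) else st)
          (PRIORITY_ASSETS.foldl (fun st asset => if asset ∈ xs ∧ ¬ asset ∈ st.2
            then (st.1 ++ [asset], PySem.Set.add st.2 asset) else st)
          (([] : List String), (PySem.Set.empty : PySem.Set String)))).1 := rfl
  have hmem : ∀ a, a ∈ (PRIORITY_ASSETS.foldl (fun st asset => if asset ∈ xs ∧ ¬ asset ∈ st.2
          then (st.1 ++ [asset], PySem.Set.add st.2 asset) else st)
          (([] : List String), (PySem.Set.empty : PySem.Set String))).2
        ↔ a ∈ (PRIORITY_ASSETS.foldl (fun st asset => if asset ∈ xs ∧ ¬ asset ∈ st.2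
          then (st.1 ++ [asset], PySem.Set.add st.2 asset) else st)
          (([] : List String), (PySem.Set.empty : PySem.Set String))).1 := by
    intro a
    rw [h1.2 a, h1.1]
  have h2' : (xs.foldl (fun st asset => if ¬ asset ∈ st.2
            then (st.1 ++ [asset], PySem.Set.add st.2 asset) else st)
          (PRIORITY_ASSETS.foldl (fun st asset => if asset ∈ xs ∧ ¬ asset ∈ st.2
            then (st.1 ++ [asset], PySem.Set.add st.2 asset) else st)
          (([] : List String), (PySem.Set.empty : PySem.Set String)))).1
      = (PRIORITY_ASSETS.foldl (fun st asset => if asset ∈ xs ∧ ¬ asset ∈ st.2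
            then (st.1 ++ [asset], PySem.Set.add st.2 asset) else st)
          (([] : List String), (PySem.Set.empty : PySem.Set String))).1
        ++ fOcc xs (PRIORITY_ASSETS.foldl (fun st asset => if asset ∈ xs ∧ ¬ asset ∈ st.2
            then (st.1 ++ [asset], PySem.Set.add st.2 asset) else st)
          (([] : List String), (PySem.Set.empty : PySem.Set String))).1 :=
    loopA2 xs _ _ hmem
  rw [hfold, h2', h1.1]
  simp only [List.nil_append]
  congr 1
  have hf := fOcc_filter xs [] (PRIORITY_ASSETS.filter (fun a => decide (a ∈ xs)))
  simp only [List.nil_append] at hf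
  rw [hf, ← dedup_eq_fOcc]
  apply List.filter_congr
  intro b hb
  have hbxs : b ∈ xs := (PySem.List.mem_dedup xs b).mp hb
  by_cases hbP : b ∈ PRIORITY_ASSETS
  · simp [List.mem_filter, hbP, hbxs]
  · simp [List.mem_filter, hbP]

lemma B_eq (xs : List String) :
    sort_resources_alt xs = PRIORITY_ASSETS.filter (fun a => decide (a ∈ PySem.List.dedup xs))
      ++ (PySem.List.dedup xs).filter (fun a => decide (a ∉ PRIORITY_ASSETS)) := by
  show PySem.List.sorted (PySem.List.dedup xs) pyKey false = _
  rw [PySem.List.sorted_eq_foldl_insertBy]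
  have h := foldl_insert_canon (PySem.List.dedup xs) [] (by simpa using PySem.List.nodup_dedup xs)
  have hc : canonOf [] = [] := by simp [canonOf]
  rw [hc] at h
  rw [h]
  simp only [List.nil_append]
  rfl

-- ===== VERDICT (by name: the statement is the Claim_ definition above) =====
theorem sort_resources_spec : Claim_equal_sort_resources := by
  intro xs _
  show sort_resources xs = sort_resources_alt xs
  rw [A_eq, B_eq]
  congr 1
  apply List.filter_congr
  intro b _
  simp
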